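-- pv_equiv track=rewrite | github.com/chroadhouse/2048-AI | Main.py | slideRow
-- ===== SOURCE A (Python) =====
-- def slideRow(row):
--     # Slides the row to the other side
--
--     temp = ['0', '0', '0', '0']
--     index = 3
--     for i in range(3, -1, -1):
--         if row[i] != '0':
--             temp[index] = row[i]
--             index -= 1
--
--     return temp
-- ===== SOURCE B (Python) =====
-- def slideRow(row):
--     # Stable sort of the four cells by the key (v != '0'): False (zeros) sorts
--     # before True (non-zeros), and stability preserves the relative order of
--     # the non-zero tiles -- exactly a slide to the right.
--     vals = [row[0], row[1], row[2], row[3]]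
--     return sorted(vals, key=lambda v: v != '0')
-- ===== Notes on version B (the rewrite author's own statement) =====
-- stated objective: idiomatic
-- what changed: A's reverse scan writing into a mutable 4-cell buffer with a decrementing pointer is replaced by a stable sort of the four cells keyed on (v != '0'), which moves zeros left and keeps non-zero tiles in order by stability.
import Mathlib
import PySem

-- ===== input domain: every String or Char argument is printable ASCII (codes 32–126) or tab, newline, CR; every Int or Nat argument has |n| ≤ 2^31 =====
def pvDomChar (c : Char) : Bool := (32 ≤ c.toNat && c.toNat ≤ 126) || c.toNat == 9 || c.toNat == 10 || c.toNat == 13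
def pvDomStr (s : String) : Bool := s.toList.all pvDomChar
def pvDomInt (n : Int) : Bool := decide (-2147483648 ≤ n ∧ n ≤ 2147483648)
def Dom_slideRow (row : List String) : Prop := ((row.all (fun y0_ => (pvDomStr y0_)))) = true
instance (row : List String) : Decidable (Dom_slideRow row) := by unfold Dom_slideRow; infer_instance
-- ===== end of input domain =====

-- B replaces A's reverse scan with a decrementing write pointer by a stable
-- sort of the four cells keyed on (v != '0') (objective: idiomatic).


-- ===== PORT A =====
-- temp = ['0','0','0','0']; index = 3; for i in range(3,-1,-1): if row[i] != '0': temp[index]=row[i]; index -= 1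
-- row[i] via pyGet? (none = IndexError, excluded by Pre_; .getD "" totalises).
def slideRow (row : List String) : List String :=
  let st := (PySem.List.pyRange 3 (-1) (-1)).foldl
    (fun (st : List String × Int) (i : Int) =>
      let v := (PySem.List.pyGet? row i).getD ""
      if v ≠ "0" then (st.1.set st.2.toNat v, st.2 - 1) else st)
    (["0", "0", "0", "0"], 3)
  st.1

-- ===== PORT B =====
-- vals = [row[0],row[1],row[2],row[3]]; sorted(vals, key=lambda v: v != '0')
-- (Python bool key: False = 0 < True = 1).
def slideRow_alt (row : List String) : List String :=
  let vals := [(PySem.List.pyGet? row 0).getD "", (PySem.List.pyGet? row 1).getD "",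
               (PySem.List.pyGet? row 2).getD "", (PySem.List.pyGet? row 3).getD ""]
  PySem.List.sorted vals (fun v => if v ≠ "0" then (1 : Nat) else 0)

-- ===== PRECONDITION & SPEC =====
-- Pre_ excludes rows of length < 4, on which the Python A (and B) raise IndexError.
def Pre_slideRow (row : List String) : Prop := 4 ≤ row.length
instance (row : List String) : Decidable (Pre_slideRow row) := by unfold Pre_slideRow; infer_instance
def pvWitness_slideRow : List String := ["2", "0", "4", "0"]

def Spec_slideRow (row : List String) (out : List String) : Prop := out = slideRow_alt row
instance (row : List String) (out : List String) : Decidable (Spec_slideRow row out) := by unfold Spec_slideRow; infer_instance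

-- ===== CLAIM =====
def Claim_equal_slideRow : Prop := ∀ (row : List String), Dom_slideRow row → Pre_slideRow row → Spec_slideRow row (slideRow row)

-- ===== LEMMAS AND PROOFS =====
theorem slideRow_eq_alt (a b c d : String) (rest : List String) :
    slideRow (a :: b :: c :: d :: rest) = slideRow_alt (a :: b :: c :: d :: rest) := by
  have g0 : PySem.List.pyGet? (a :: b :: c :: d :: rest) 0 = some a := by
    rw [show (0:Int) = ((0:Nat) : Int) by norm_num, PySem.List.pyGet?_natCast]; rfl
  have g1 : PySem.List.pyGet? (a :: b :: c :: d :: rest) 1 = some b := by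
    rw [show (1:Int) = ((1:Nat) : Int) by norm_num, PySem.List.pyGet?_natCast]; rfl
  have g2 : PySem.List.pyGet? (a :: b :: c :: d :: rest) 2 = some c := by
    rw [show (2:Int) = ((2:Nat) : Int) by norm_num, PySem.List.pyGet?_natCast]; rfl
  have g3 : PySem.List.pyGet? (a :: b :: c :: d :: rest) 3 = some d := by
    rw [show (3:Int) = ((3:Nat) : Int) by norm_num, PySem.List.pyGet?_natCast]; rfl
  have hr : PySem.List.pyRange 3 (-1) (-1) = [3, 2, 1, 0] := by decide
  unfold slideRow slideRow_alt
  simp only [hr, List.foldl, g0, g1, g2, g3, Option.getD_some,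
    PySem.List.sorted_eq_foldl_insertBy]
  by_cases ha : a = "0" <;> by_cases hb : b = "0" <;> by_cases hc : c = "0" <;> by_cases hd : d = "0" <;>
    simp [ha, hb, hc, hd, PySem.List.insertBy, List.set]

-- ===== VERDICT =====
theorem slideRow_spec : Claim_equal_slideRow := by
  intro row _ hpre
  unfold Spec_slideRow
  match row, hpre with
  | a :: b :: c :: d :: rest, _ => exact slideRow_eq_alt a b c d rest
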